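-- pv_equiv track=rewrite | github.com/Flasticka/HPE_data_corrector | rapid_change_mistake_postprocess/repair_frames.py | get_missing_intervals
-- ===== SOURCE A (Python) =====
-- def get_missing_intervals(points_wrong_frames):
--     if len(points_wrong_frames) == 0:
--         return []
--     points_wrong_frames = sorted(points_wrong_frames)
--     result = []
--     first = points_wrong_frames[0]
--     second = points_wrong_frames[0]
--     for i in range(1, len(points_wrong_frames)):
--         if second == points_wrong_frames[i] - 1:
--             second = points_wrong_frames[i]
--         else:
--             result.append((first, second))
--             first = points_wrong_frames[i]
--             second = points_wrong_frames[i]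
--     result.append((first, second))
--     return result
-- ===== SOURCE B (Python) =====
-- def get_missing_intervals(points_wrong_frames):
--     xs = sorted(points_wrong_frames)
--     breaks = [(a, b) for a, b in zip(xs, xs[1:]) if b != a + 1]
--     starts = xs[:1] + [b for a, b in breaks]
--     ends = [a for a, b in breaks] + xs[-1:]
--     return list(zip(starts, ends))
-- ===== Notes on version B (the rewrite author's own statement) =====
-- stated objective: idiomatic
-- what changed: Replaces A's stateful accumulator loop with stateless staged passes: compute the break pairs (adjacent sorted values that are not consecutive) once, derive the run-start list and run-end list from them, and zip the two lists into intervals.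
import Mathlib
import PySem

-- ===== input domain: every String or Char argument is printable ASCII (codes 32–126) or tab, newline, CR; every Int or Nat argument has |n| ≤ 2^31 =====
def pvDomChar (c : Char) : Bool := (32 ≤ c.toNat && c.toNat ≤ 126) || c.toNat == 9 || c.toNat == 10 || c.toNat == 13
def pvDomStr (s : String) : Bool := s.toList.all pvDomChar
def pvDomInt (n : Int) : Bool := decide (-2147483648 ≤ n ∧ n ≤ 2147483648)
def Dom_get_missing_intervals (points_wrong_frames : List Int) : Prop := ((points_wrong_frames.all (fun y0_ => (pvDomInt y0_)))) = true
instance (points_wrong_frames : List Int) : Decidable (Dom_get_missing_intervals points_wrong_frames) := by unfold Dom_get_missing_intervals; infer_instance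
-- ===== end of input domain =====

-- B replaces A's stateful accumulator loop with stateless staged passes: compute the
-- break pairs (adjacent sorted values that are not consecutive) once, derive the
-- run-start and run-end lists from them, and zip the two lists (objective: idiomatic).

-- ===== PORT A =====
def get_missing_intervals (points_wrong_frames : List Int) : List (Int × Int) :=
  if points_wrong_frames.length = 0 then [] else
    let s := PySem.List.sorted points_wrong_frames (fun x => x) false
    let first := PySem.List.pyGetD s 0 0   -- s[0]; s is nonempty here, so the default is never used
    let st := (PySem.List.pyRange 1 (s.length : Int) 1).foldl
      (fun (acc : List (Int × Int) × Int × Int) i =>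
        let x := PySem.List.pyGetD s i 0   -- s[i]; i in range, default never used
        if acc.2.2 = x - 1 then (acc.1, acc.2.1, x)
        else (acc.1 ++ [(acc.2.1, acc.2.2)], x, x))
      ([], first, first)
    st.1 ++ [(st.2.1, st.2.2)]

-- ===== PORT B =====
def get_missing_intervals_alt (points_wrong_frames : List Int) : List (Int × Int) :=
  let xs := PySem.List.sorted points_wrong_frames (fun x => x) false
  let breaks := (xs.zip (PySem.List.slice xs (some 1) none)).filter (fun p => p.2 != p.1 + 1)
  let starts := PySem.List.slice xs none (some 1) ++ breaks.map (fun p => p.2)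
  let ends := breaks.map (fun p => p.1) ++ PySem.List.slice xs (some (-1)) none
  starts.zip ends

-- ===== PRECONDITION & SPEC =====
def Spec_get_missing_intervals (points_wrong_frames : List Int) (out : List (Int × Int)) : Prop := out = get_missing_intervals_alt points_wrong_frames
instance (points_wrong_frames : List Int) (out : List (Int × Int)) : Decidable (Spec_get_missing_intervals points_wrong_frames out) := by unfold Spec_get_missing_intervals; infer_instance

-- ===== CLAIM (what is proved, stated in full; the proofs are below) =====
def Claim_equal_get_missing_intervals : Prop := ∀ (points_wrong_frames : List Int), Dom_get_missing_intervals points_wrong_frames → Spec_get_missing_intervals points_wrong_frames (get_missing_intervals points_wrong_frames)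

-- ===== LEMMAS AND PROOFS =====

-- functional form of A's loop result (closing append included)
def pvAux (f s : Int) : List Int → List (Int × Int)
  | [] => [(f, s)]
  | x :: t => if s = x - 1 then pvAux f x t else (f, s) :: pvAux x x t

theorem pvFoldA_eq_aux (t : List Int) (res : List (Int × Int)) (f s : Int) :
    (t.foldl (fun (acc : List (Int × Int) × Int × Int) x =>
        if acc.2.2 = x - 1 then (acc.1, acc.2.1, x)
        else (acc.1 ++ [(acc.2.1, acc.2.2)], x, x)) (res, f, s)).1
      ++ [((t.foldl (fun (acc : List (Int × Int) × Int × Int) x =>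
        if acc.2.2 = x - 1 then (acc.1, acc.2.1, x)
        else (acc.1 ++ [(acc.2.1, acc.2.2)], x, x)) (res, f, s)).2.1,
          (t.foldl (fun (acc : List (Int × Int) × Int × Int) x =>
        if acc.2.2 = x - 1 then (acc.1, acc.2.1, x)
        else (acc.1 ++ [(acc.2.1, acc.2.2)], x, x)) (res, f, s)).2.2)]
      = res ++ pvAux f s t := by
  induction t generalizing res f s with
  | nil => simp [pvAux]
  | cons x t ih =>
    simp only [List.foldl_cons, pvAux]
    split
    · rw [ih]
    · rw [ih]; simp

-- the break pairs of a list: adjacent pairs whose second value does not continue the run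
def pvBrk (l : List Int) : List (Int × Int) :=
  (l.zip l.tail).filter (fun p => p.2 != p.1 + 1)

theorem pvAux_eq_zip (t : List Int) (f s : Int) :
    pvAux f s t
      = (f :: (pvBrk (s :: t)).map Prod.snd).zip
          ((pvBrk (s :: t)).map Prod.fst ++ (s :: t).drop t.length) := by
  induction t generalizing f s with
  | nil => simp [pvAux, pvBrk]
  | cons x t ih =>
    have hbrk : pvBrk (s :: x :: t)
        = (if x ≠ s + 1 then [(s, x)] else []) ++ pvBrk (x :: t) := by
      simp only [pvBrk, List.tail_cons, List.zip_cons_cons, List.filter_cons]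
      split_ifs with h1 h2 h3 <;> simp_all
    simp only [pvAux]
    by_cases h : s = x - 1
    · have hx : ¬ x ≠ s + 1 := by omega
      rw [if_pos h, hbrk, if_neg hx, List.nil_append, ih]
      simp
    · have hx : x ≠ s + 1 := by omega
      rw [if_neg h, hbrk, if_pos hx, ih]
      simp

-- ===== VERDICT (by name: the statement is the Claim_ definition above) =====
theorem get_missing_intervals_spec : Claim_equal_get_missing_intervals := by
  intro pts _
  unfold Spec_get_missing_intervals get_missing_intervals get_missing_intervals_alt
  by_cases h : pts.length = 0
  · have : pts = [] := List.length_eq_zero_iff.mp h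
    subst this
    have : PySem.List.slice ([] : List Int) none (some 1) = [] := by
      rw [PySem.List.slice_to _ (by norm_num : (0:Int) ≤ 1)]; rfl
    simp [PySem.List.sorted, this]
  · rw [if_neg h]
    set s := PySem.List.sorted pts (fun x => x) false with hs
    have hslen : s.length = pts.length := PySem.List.length_sorted ..
    have hsne : s ≠ [] := by
      intro hnil; exact h (by rw [← hslen, hnil]; rfl)
    obtain ⟨a, t, hst⟩ := List.exists_cons_of_ne_nil hsne
    have h0 : PySem.List.pyGetD s 0 0 = a := by
      rw [hst]; simp [PySem.List.pyGetD, PySem.List.pyGet?, PySem.List.pyIdx?]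
    have hdrop : s.drop (1:Int).toNat = t := by rw [hst]; rfl
    dsimp only
    rw [h0]
    have hF := PySem.List.foldl_pyRange_pyGetD' s 0
      (fun (acc : List (Int × Int) × Int × Int) x =>
        if acc.2.2 = x - 1 then (acc.1, acc.2.1, x)
        else (acc.1 ++ [(acc.2.1, acc.2.2)], x, x))
      ([], a, a) (by norm_num : (0:Int) ≤ 1)
    simp only [] at hF
    rw [hF, hdrop]
    rw [pvFoldA_eq_aux t [] a a, List.nil_append, pvAux_eq_zip]
    -- now rewrite B's slices on s = a :: t
    have h1 : PySem.List.slice s (some 1) none = t := by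
      rw [PySem.List.slice_from_one, hst, List.tail_cons]
    have h2 : PySem.List.slice s none (some 1) = [a] := by
      rw [PySem.List.slice_to s (by norm_num : (0:Int) ≤ 1), hst]
      rfl
    have h3 : PySem.List.slice s (some (-1)) none = (a :: t).drop t.length := by
      rw [PySem.List.slice_from_neg_one, hst]
      simp
    rw [h1, h2, h3, hst]
    simp [pvBrk]
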